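-- pv_equiv track=rewrite | github.com/Kentyahoo/imageproc | gaussian.py | weight_multiplier
-- ===== SOURCE A (Python) =====
-- def weight_multiplier(sz, row):
--     '''first part returns eg. [1,2,4,2,1], second part matches and multiplies with row. weights the numbers in (row)'''
--     half = sz // 2
--     weights = []
--     value = 1
--
--     for i in range(sz):
--         weights.append(value)
--         if i < half:
--             value *= 2
--         else:
--             value //= 2
--
--     res = []
--     for i in range(len(row)):
--         res.append(row[i] * weights[i])
--     return res
-- ===== SOURCE B (Python) =====
-- def weight_multiplier(sz, row):
--     half = sz // 2
--     weights = [2 ** (half - abs(i - half)) for i in range(sz)]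
--     return [row[i] * weights[i] for i in range(len(row))]
-- ===== Notes on version B (the rewrite author's own statement) =====
-- stated objective: simpler
-- what changed: The stateful doubling/halving accumulator loop that builds the weights is replaced by the closed-form 2**(half-|i-half|) per position, and both explicit append-loops become comprehensions.
import Mathlib
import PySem

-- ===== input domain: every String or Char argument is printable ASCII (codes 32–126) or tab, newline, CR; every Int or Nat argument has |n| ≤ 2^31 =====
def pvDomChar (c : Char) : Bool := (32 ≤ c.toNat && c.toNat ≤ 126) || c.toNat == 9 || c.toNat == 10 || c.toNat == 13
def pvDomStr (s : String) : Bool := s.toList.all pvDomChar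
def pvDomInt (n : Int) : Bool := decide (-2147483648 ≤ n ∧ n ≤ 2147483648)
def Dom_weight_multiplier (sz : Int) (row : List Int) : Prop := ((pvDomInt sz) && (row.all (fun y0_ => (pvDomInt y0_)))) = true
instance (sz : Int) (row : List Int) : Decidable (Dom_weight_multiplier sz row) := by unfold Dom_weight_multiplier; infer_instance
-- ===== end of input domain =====

-- B replaces A's stateful doubling/halving weights loop by the closed form 2^(half-|i-half|) (objective: simpler).

-- ===== PORT A =====
-- literal transliteration: first loop builds (weights, value); second loop multiplies positionally.
-- weights[i] out of range raises IndexError in Python; Pre_ excludes that, the port uses getD 0 there.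
def weight_multiplier (sz : Int) (row : List Int) : List Int :=
  let half := PySem.Int.floordiv sz 2
  let wv : List Int × Int :=
    (PySem.List.pyRange 0 sz 1).foldl
      (fun (s : List Int × Int) i =>
        let weights := s.1 ++ [s.2]
        if i < half then (weights, s.2 * 2) else (weights, PySem.Int.floordiv s.2 2))
      ([], 1)
  (PySem.List.pyRange 0 (row.length : Int) 1).foldl
    (fun res i => res ++ [PySem.List.pyGetD row i 0 * PySem.List.pyGetD wv.1 i 0]) []

-- ===== PORT B =====
-- 2 ** e in Source B: the exponent half - |i - half| is ≥ 0 for every i in range(sz), so ·.toNat is exact there.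
def weight_multiplier_alt (sz : Int) (row : List Int) : List Int :=
  let half := PySem.Int.floordiv sz 2
  let weights := (PySem.List.pyRange 0 sz 1).map (fun i => (2 : Int) ^ (half - |i - half|).toNat)
  (PySem.List.pyRange 0 (row.length : Int) 1).map
    (fun i => PySem.List.pyGetD row i 0 * PySem.List.pyGetD weights i 0)

-- ===== PRECONDITION & SPEC =====
-- Pre_ excludes exactly the inputs where Python A raises IndexError: len(row) exceeds the
-- length of the weights list, which is max sz 0.
def Pre_weight_multiplier (sz : Int) (row : List Int) : Prop := (row.length : Int) ≤ max sz 0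
instance (sz : Int) (row : List Int) : Decidable (Pre_weight_multiplier sz row) := by unfold Pre_weight_multiplier; infer_instance
def pvWitness_weight_multiplier : Int × List Int := (5, [3, 1, 4, 1, 5])

def Spec_weight_multiplier (sz : Int) (row : List Int) (out : List Int) : Prop := out = weight_multiplier_alt sz row
instance (sz : Int) (row : List Int) (out : List Int) : Decidable (Spec_weight_multiplier sz row out) := by unfold Spec_weight_multiplier; infer_instance

-- ===== CLAIM (what is proved, stated in full; the proofs are below) =====
def Claim_equal_weight_multiplier : Prop := ∀ (sz : Int) (row : List Int), Dom_weight_multiplier sz row → Pre_weight_multiplier sz row → Spec_weight_multiplier sz row (weight_multiplier sz row)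

-- ===== LEMMAS AND PROOFS =====

-- the running value of A's first loop, before step k
def pvVal (half : Int) : Nat → Int
  | 0 => 1
  | n + 1 => if (n : Int) < half then pvVal half n * 2 else PySem.Int.floordiv (pvVal half n) 2

-- A's first loop computed over range n
theorem pv_fold_weights (half : Int) (n : Nat) :
    (PySem.List.pyRange 0 (n : Int) 1).foldl
      (fun (s : List Int × Int) i =>
        if i < half then (s.1 ++ [s.2], s.2 * 2) else (s.1 ++ [s.2], PySem.Int.floordiv s.2 2))
      ([], 1)
    = ((List.range n).map (fun k => pvVal half k), pvVal half n) := by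
  induction n with
  | zero => simp [PySem.List.pyRange_one_eq_nil, pvVal]
  | succ n ih =>
    have h : ((n : Int) + 1) = ((n + 1 : Nat) : Int) := by push_cast; ring
    rw [show ((n + 1 : Nat) : Int) = (n : Int) + 1 by push_cast; ring,
        PySem.List.pyRange_one_succ_right (by positivity)]
    simp only [List.foldl_append, List.foldl_cons, List.foldl_nil, ih, List.range_succ,
      List.map_append, List.map_cons, List.map_nil, pvVal]
    split_ifs <;> simp

theorem pv_floordiv_pow (m : Nat) : PySem.Int.floordiv ((2 : Int) ^ (m + 1)) 2 = 2 ^ m := by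
  rw [PySem.Int.floordiv_eq_ediv_of_pos (by norm_num)]
  rw [pow_succ]
  omega

-- closed form for the running value, for k ≤ 2*half
theorem pv_val_closed (half : Int) (k : Nat) (hk : (k : Int) ≤ 2 * half) :
    pvVal half k = (2 : Int) ^ (half - |(k : Int) - half|).toNat := by
  induction k with
  | zero =>
    have h0 : 0 ≤ half := by omega
    simp [pvVal, abs_of_nonpos (by omega : -half ≤ 0)]
  | succ k ih =>
    have hk' : (k : Int) ≤ 2 * half := by push_cast at hk ⊢; omega
    rw [pvVal, ih hk']
    push_cast at hk
    by_cases h : (k : Int) < half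
    · rw [if_pos h]
      rw [abs_of_nonpos (by omega), abs_of_nonpos (by push_cast; omega)]
      rw [← pow_succ]
      congr 1
      push_cast
      omega
    · rw [if_neg h]
      rw [abs_of_nonneg (by omega), abs_of_nonneg (by omega)]
      have h1 : (half - ((k : Int) - half)).toNat = (half - (((k : Nat) + 1 : Int) - half)).toNat + 1 := by
        omega
      rw [h1, pv_floordiv_pow]
      norm_num

-- the two weights lists coincide for every sz
theorem pv_weights_eq (sz : Int) :
    ((PySem.List.pyRange 0 sz 1).foldl
      (fun (s : List Int × Int) i =>
        if i < PySem.Int.floordiv sz 2 then (s.1 ++ [s.2], s.2 * 2)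
        else (s.1 ++ [s.2], PySem.Int.floordiv s.2 2))
      ([], 1)).1
    = (PySem.List.pyRange 0 sz 1).map
        (fun i => (2 : Int) ^ (PySem.Int.floordiv sz 2 - |i - PySem.Int.floordiv sz 2|).toNat) := by
  set half := PySem.Int.floordiv sz 2 with hhalf
  rcases le_or_gt sz 0 with hsz | hsz
  · rw [PySem.List.pyRange_one_eq_nil hsz]
    simp
  · have hsz' : sz = (sz.toNat : Int) := by omega
    rw [hsz', pv_fold_weights, PySem.List.pyRange_one, List.map_map]
    simp only
    have hhb : 2 * half ≥ sz - 1 := by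
      have := PySem.Int.floordiv_mul_add_mod sz 2
      have := PySem.Int.mod_two_eq sz
      omega
    apply List.map_congr_left
    intro k hk
    have hk' : k < sz.toNat := List.mem_range.mp hk
    have : (k : Int) ≤ 2 * half := by omega
    rw [pv_val_closed half k this]
    norm_num

-- foldl-append over a range is map over that range
theorem pv_foldl_append_map (f : Int → Int) (l : List Int) (acc : List Int) :
    l.foldl (fun res i => res ++ [f i]) acc = acc ++ l.map f := by
  induction l generalizing acc with
  | nil => simp
  | cons x xs ih => simp [ih]

-- ===== VERDICT (by name: the statement is the Claim_ definition above) =====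
theorem weight_multiplier_spec : Claim_equal_weight_multiplier := by
  intro sz row _ _
  unfold Spec_weight_multiplier weight_multiplier weight_multiplier_alt
  simp only
  rw [pv_weights_eq, pv_foldl_append_map]
  simp
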